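-- pv_equiv track=rewrite | github.com/DaviReisVieira/Z01.1-Gnomos | Projetos/E-Assembly/src/excelToLCD.py | converte_em_bits
-- ===== SOURCE A (Python) =====
-- def converte_em_bits(coord_vetores):
--     """
--     Transforma todas as coordenadas em números de 0 a 15,
--     em que cada número corresponde à ordem do bit 1
--     """
--     mod_coord_vetores = {}
--     for linha, lista_vetores in coord_vetores.items():
--         lista_mod_colunas = []
--         k=0
--         while k< len(lista_vetores):
--             if k == 0:
--                 mod = list(map(lambda n: n % (1*16), lista_vetores[k]))
--             else:
--                 mod = list(map(lambda n: n % ((k)*16), lista_vetores[k]))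
--
--             lista_mod_colunas.append(mod)
--             k += 1
--
--         mod_coord_vetores[linha] = lista_mod_colunas
--
--     #$ Transforma coordenadas no vetor de bits:
--     coord_vetores_bits = {}
--     for linha, lista_vetores in mod_coord_vetores.items():
--         lista_vetor_bits = []
--         for vetor in lista_vetores:
--             k = 0
--             vetor_bits = '0000000000000000'
--             while k<=15:
--                 if k in vetor:
--                     vetor_bits = vetor_bits[:k] + '1' + vetor_bits[k+1:]
--
--                 k += 1
--             lista_vetor_bits.append(vetor_bits)
--
--         coord_vetores_bits[linha] = lista_vetor_bits
--
--     return coord_vetores_bits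
-- ===== SOURCE B (Python) =====
-- def converte_em_bits(coord_vetores):
--     """One fused pass: for each row, set buffer positions directly from the
--     modded values instead of testing 0..15 membership per bit."""
--     out = {}
--     for linha, lista_vetores in coord_vetores.items():
--         lista_bits = []
--         for k, vetor in enumerate(lista_vetores):
--             m = 16 if k <= 1 else 16 * k
--             buf = ['0'] * 16
--             for n in vetor:
--                 r = n % m
--                 if r <= 15:
--                     buf[r] = '1'
--             lista_bits.append(''.join(buf))
--         out[linha] = lista_bits
--     return out
-- ===== Notes on version B (the rewrite author's own statement) =====
-- stated objective: faster
-- what changed: B fuses the two dict passes into one and inverts the inner loop: instead of building an intermediate dict of modded lists and then testing 'k in vetor' for each of the 16 bit positions (a membership scan per position), B walks each vector once, setting buffer[n % m] = '1' directly, and joins the buffer.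
import Mathlib
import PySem

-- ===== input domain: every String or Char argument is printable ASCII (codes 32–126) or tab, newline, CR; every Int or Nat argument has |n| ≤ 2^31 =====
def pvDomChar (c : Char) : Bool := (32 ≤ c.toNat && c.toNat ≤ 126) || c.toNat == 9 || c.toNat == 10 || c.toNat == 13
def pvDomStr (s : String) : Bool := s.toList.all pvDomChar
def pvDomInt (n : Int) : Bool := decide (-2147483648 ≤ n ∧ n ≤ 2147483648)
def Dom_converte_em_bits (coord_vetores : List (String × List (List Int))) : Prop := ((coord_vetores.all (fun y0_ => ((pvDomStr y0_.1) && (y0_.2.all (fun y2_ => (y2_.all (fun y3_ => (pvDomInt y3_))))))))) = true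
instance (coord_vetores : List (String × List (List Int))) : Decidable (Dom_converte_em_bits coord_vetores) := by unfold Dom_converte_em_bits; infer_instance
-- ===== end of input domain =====

-- B fuses A's two dict passes into one and replaces the 16 per-position membership tests
-- by a single pass over each vector that sets buffer positions directly (objective: faster).

-- ===== PORT A =====
def converte_em_bits (coord_vetores : List (String × List (List Int))) : List (String × List String) :=
  -- phase 1: mod_coord_vetores[linha] = [[n % (16 or k*16) for n in lista_vetores[k]] for k …]
  let mod_coord_vetores : PySem.Dict String (List (List Int)) :=
    coord_vetores.foldl (fun d p =>
      let lista_mod_colunas :=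
        (PySem.List.pyRange 0 p.2.length 1).foldl (fun acc k =>
          let m :=
            if k == 0 then (PySem.List.pyGetD p.2 k []).map (fun n => PySem.Int.mod n (1 * 16))
            else (PySem.List.pyGetD p.2 k []).map (fun n => PySem.Int.mod n (k * 16))
          acc ++ [m]) []
      d.insert p.1 lista_mod_colunas) PySem.Dict.empty
  -- phase 2: for each vetor, k = 0..15, flip position k of '0000000000000000' if k in vetor
  let coord_vetores_bits : PySem.Dict String (List String) :=
    mod_coord_vetores.items.foldl (fun d p =>
      let lista_vetor_bits :=
        p.2.foldl (fun acc vetor =>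
          let vetor_bits :=
            (PySem.List.pyRange 0 16 1).foldl (fun s k =>
              if vetor.contains k then
                PySem.List.slice s none (some k) ++ ['1'] ++ PySem.List.slice s (some (k + 1)) none
              else s) (String.toList "0000000000000000")
          acc ++ [String.ofList vetor_bits]) []
      d.insert p.1 lista_vetor_bits) PySem.Dict.empty
  coord_vetores_bits.items

-- ===== PORT B =====
-- Source B's inner loop: buf = ['0']*16; for n in vetor: r = n % m; if r <= 15: buf[r] = '1'
def pvBitsLine (k : Int) (vetor : List Int) : String :=
  let m : Int := if k ≤ 1 then 16 else 16 * k
  String.ofList (vetor.foldl (fun buf n =>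
    let r := PySem.Int.mod n m
    if r ≤ 15 then PySem.List.pySetD buf r '1' else buf) (List.replicate 16 '0'))

def converte_em_bits_alt (coord_vetores : List (String × List (List Int))) : List (String × List String) :=
  (coord_vetores.foldl (fun d p =>
    d.insert p.1 ((PySem.List.enumerate p.2).map (fun q => pvBitsLine q.1 q.2)))
    PySem.Dict.empty).items

-- ===== PRECONDITION & SPEC =====
def Spec_converte_em_bits (coord_vetores : List (String × List (List Int))) (out : List (String × List String)) : Prop := out = converte_em_bits_alt coord_vetores
instance (coord_vetores : List (String × List (List Int))) (out : List (String × List String)) : Decidable (Spec_converte_em_bits coord_vetores out) := by unfold Spec_converte_em_bits; infer_instance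

-- ===== CLAIM (what is proved, stated in full; the proofs are below) =====
def Claim_equal_converte_em_bits : Prop := ∀ (coord_vetores : List (String × List (List Int))), Dom_converte_em_bits coord_vetores → Spec_converte_em_bits coord_vetores (converte_em_bits coord_vetores)

-- ===== LEMMAS AND PROOFS =====

theorem pvA_gen (mods : List Int) : ∀ j : Nat, j ≤ 16 →
    (PySem.List.pyRange 0 (j : Int) 1).foldl (fun s k =>
      if mods.contains k then
        PySem.List.slice s none (some k) ++ ['1'] ++ PySem.List.slice s (some (k + 1)) none
      else s) (String.toList "0000000000000000") =
    (List.range 16).map (fun i => if i < j ∧ mods.contains (i : Int) then '1' else '0') := by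
  intro j
  induction j with
  | zero =>
    intro _
    rw [PySem.List.pyRange_one_eq_nil (by omega)]
    simp [String.toList]
    decide
  | succ j ih =>
    intro hj
    have hj' : j ≤ 16 := by omega
    have : ((j : Int) + 1) = ((j + 1 : Nat) : Int) := by push_cast; ring
    rw [← this, PySem.List.pyRange_one_succ_right (by omega), List.foldl_append]
    rw [ih hj']
    set cs := (List.range 16).map (fun i => if i < j ∧ mods.contains (i : Int) then '1' else '0') with hcs
    have hlen : cs.length = 16 := by simp [hcs]
    simp only [List.foldl_cons, List.foldl_nil]
    by_cases hc : mods.contains ((j : Int)) = true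
    · rw [if_pos hc]
      rw [PySem.List.slice_to_natCast]
      have : (j : Int) + 1 = ((j + 1 : Nat) : Int) := by push_cast; ring
      rw [this, PySem.List.slice_from_natCast]
      rw [List.append_assoc, List.singleton_append, ← List.set_eq_take_cons_drop '1' (by omega)]
      apply List.ext_getElem
      · simp [hlen]
      · intro i hi hi2
        simp only [hcs, List.getElem_set, List.getElem_map, List.getElem_range]
        simp only [List.length_map, List.length_range] at hi2
        by_cases hij : j = i
        · subst hij; rw [if_pos rfl, if_pos ⟨by omega, hc⟩]
        · rw [if_neg hij]
          have hij' : i ≠ j := fun h => hij h.symm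
          by_cases h1 : i < j ∧ mods.contains (i : Int) = true
          · rw [if_pos h1, if_pos ⟨by omega, h1.2⟩]
          · rw [if_neg h1, if_neg (by rintro ⟨h2, h3⟩; exact h1 ⟨by omega, h3⟩)]
    · rw [if_neg hc]
      apply List.map_congr_left
      intro i hi
      simp only [List.mem_range] at hi
      by_cases hij : i = j
      · subst hij
        rw [if_neg (by rintro ⟨_, h3⟩; exact absurd h3 (by simpa using hc)),
            if_neg (by rintro ⟨_, h3⟩; exact absurd h3 (by simpa using hc))]
      · by_cases h1 : i < j ∧ mods.contains (i : Int) = true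
        · rw [if_pos h1, if_pos ⟨by omega, h1.2⟩]
        · rw [if_neg h1, if_neg (by rintro ⟨h2, h3⟩; exact h1 ⟨by omega, h3⟩)]

theorem pvB_len (m : Int) (vetor : List Int) (buf : List Char) :
    (vetor.foldl (fun buf n =>
      let r := PySem.Int.mod n m
      if r ≤ 15 then PySem.List.pySetD buf r '1' else buf) buf).length = buf.length := by
  induction vetor generalizing buf with
  | nil => rfl
  | cons n t ih =>
    simp only [List.foldl_cons]
    rw [ih]
    by_cases h : PySem.Int.mod n m ≤ 15
    · simp [h, PySem.List.length_pySetD]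
    · simp [h]

theorem pvB_get (m : Int) (hm : 0 < m) (vetor : List Int) (buf : List Char)
    (hb : buf.length = 16) (i : Nat) (h : i < 16) :
    (vetor.foldl (fun buf n =>
      let r := PySem.Int.mod n m
      if r ≤ 15 then PySem.List.pySetD buf r '1' else buf) buf)[i]? =
    some (if (vetor.map (fun n => PySem.Int.mod n m)).contains (i : Int) then '1'
          else buf[i]'(by omega)) := by
  induction vetor generalizing buf with
  | nil =>
    simp only [List.foldl_nil, List.map_nil, List.contains_nil, if_neg Bool.false_ne_true]
    exact List.getElem?_eq_getElem (by omega)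
  | cons n t ih =>
    have hr0 : 0 ≤ PySem.Int.mod n m := PySem.Int.mod_nonneg n hm
    simp only [List.foldl_cons, List.map_cons]
    by_cases hr : PySem.Int.mod n m ≤ 15
    · rw [if_pos hr, PySem.List.pySetD_of_nonneg buf '1' hr0]
      have hlen' : (buf.set (PySem.Int.mod n m).toNat '1').length = 16 := by simp [hb]
      rw [ih _ hlen']
      by_cases hieq : (i : Int) = PySem.Int.mod n m
      · have hnat : (PySem.Int.mod n m).toNat = i := by omega
        by_cases htl : ∃ a ∈ t, PySem.Int.mod a m = (i : Int)
        · simp [List.contains_cons, htl]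
        · simp [htl, hieq.symm, List.getElem_set_self]
      · have hne : (PySem.Int.mod n m).toNat ≠ i := by omega
        simp [hieq, List.getElem_set_ne (show (PySem.Int.mod n m).toNat ≠ i by omega)]
    · rw [if_neg hr, ih _ hb]
      have hieq : ¬ ((i : Int) = PySem.Int.mod n m) := by omega
      simp [hieq]

def pvCanon (mods : List Int) : List Char :=
  (List.range 16).map (fun (i : Nat) => if mods.contains ((i : Nat) : Int) then '1' else '0')

theorem pvLine_eq (k : Int) (hk : 0 ≤ k) (vetor : List Int) :
    String.ofList (pvCanon (vetor.map (fun n =>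
      PySem.Int.mod n (if k == 0 then 1 * 16 else k * 16)))) = pvBitsLine k vetor := by
  unfold pvBitsLine pvCanon
  have hmeq : (if k == 0 then 1 * 16 else k * 16) = (if k ≤ 1 then 16 else 16 * k) := by
    by_cases h0 : k = 0
    · simp [h0]
    · by_cases h1 : k = 1
      · simp [h1]
      · rw [if_neg (by simpa using h0), if_neg (by omega)]; ring
  have hm : (0:Int) < (if k ≤ 1 then 16 else 16 * k) := by
    by_cases h1 : k ≤ 1
    · simp [h1]
    · rw [if_neg h1]; nlinarith
  rw [hmeq]
  congr 1
  apply List.ext_getElem?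
  intro i
  by_cases hi : i < 16
  · rw [pvB_get _ hm vetor _ (by simp) i hi,
        List.getElem?_eq_getElem (by simpa using hi)]
    congr 1
    simp only [List.getElem_map, List.getElem_range, List.getElem_replicate]
  · rw [List.getElem?_eq_none (by simp; omega), List.getElem?_eq_none (by rw [pvB_len]; simp; omega)]

theorem pvGetElem?_enumerate {α : Type} (xs : List α) (s : Int) (j : Nat) (h : j < xs.length) :
    (PySem.List.enumerate xs s)[j]? = some (s + j, xs[j]) := by
  induction xs generalizing s j with
  | nil => simp at h
  | cons x t ih =>
    rw [PySem.List.enumerate_cons]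
    cases j with
    | zero => simp
    | succ j =>
      rw [List.getElem?_cons_succ, ih (s + 1) j (by simpa using h)]
      simp only [List.getElem_cons_succ]
      congr 2
      push_cast; ring

theorem pvA_string (mods : List Int) :
    (PySem.List.pyRange 0 16 1).foldl (fun s k =>
      if mods.contains k then
        PySem.List.slice s none (some k) ++ ['1'] ++ PySem.List.slice s (some (k + 1)) none
      else s) (String.toList "0000000000000000") = pvCanon mods := by
  have h := pvA_gen mods 16 (le_refl 16)
  rw [show (((16:Nat)):Int) = (16:Int) by norm_num] at h
  rw [h]
  unfold pvCanon
  apply List.map_congr_left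
  intro i hi
  simp only [List.mem_range] at hi
  by_cases hc : mods.contains ((i:Nat) : Int) = true
  · rw [if_pos ⟨hi, hc⟩, if_pos hc]
  · rw [if_neg (by rintro ⟨_, h3⟩; exact hc h3), if_neg hc]

def pvF1 (lv : List (List Int)) : List (List Int) :=
  (PySem.List.pyRange 0 lv.length 1).foldl (fun acc k =>
    acc ++ [if k == 0 then (PySem.List.pyGetD lv k []).map (fun n => PySem.Int.mod n (1 * 16))
            else (PySem.List.pyGetD lv k []).map (fun n => PySem.Int.mod n (k * 16))]) []

def pvF2 (ms : List (List Int)) : List String :=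
  ms.foldl (fun acc vetor =>
    acc ++ [String.ofList ((PySem.List.pyRange 0 16 1).foldl (fun s k =>
      if vetor.contains k then
        PySem.List.slice s none (some k) ++ ['1'] ++ PySem.List.slice s (some (k + 1)) none
      else s) (String.toList "0000000000000000"))]) []

def pvG (lv : List (List Int)) : List String :=
  (PySem.List.enumerate lv).map (fun q => pvBitsLine q.1 q.2)

theorem pvRow_eq (lv : List (List Int)) : pvF2 (pvF1 lv) = pvG lv := by
  unfold pvF1 pvF2 pvG
  rw [PySem.List.foldl_append_singleton_eq_map, List.nil_append,
      PySem.List.foldl_append_singleton_eq_map, List.nil_append, List.map_map]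
  apply List.ext_getElem?
  intro j
  rw [List.getElem?_map, List.getElem?_map, PySem.List.getElem?_pyRange_one]
  by_cases hj : j < lv.length
  · rw [if_pos (by omega), pvGetElem?_enumerate lv 0 j hj]
    simp only [Option.map_some]
    congr 1
    rw [Function.comp_apply, pvA_string]
    have hget : PySem.List.pyGetD lv (0 + (j:Int)) [] = lv[j] := by
      rw [zero_add, PySem.List.pyGetD_natCast, List.getD_eq_getElem _ _ (by omega)]
    have hif : (if (0 + (j:Int)) == 0 then (PySem.List.pyGetD lv (0 + (j:Int)) []).map (fun n => PySem.Int.mod n (1 * 16))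
            else (PySem.List.pyGetD lv (0 + (j:Int)) []).map (fun n => PySem.Int.mod n ((0 + (j:Int)) * 16)))
          = lv[j].map (fun n => PySem.Int.mod n (if (0 + (j:Int)) == 0 then 1 * 16 else (0 + (j:Int)) * 16)) := by
      rw [hget]
      by_cases h0 : (0 + (j:Int)) == 0
      · rw [if_pos h0, if_pos h0]
      · rw [if_neg (by simpa using h0), if_neg (by simpa using h0)]
    rw [hif]
    have := pvLine_eq (0 + (j:Int)) (by omega) lv[j]
    rw [this, zero_add]
  · rw [if_neg (by omega), List.getElem?_eq_none (by rw [PySem.List.length_enumerate]; omega)]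
    rfl

theorem pvFold_map {X Y : Type} (F2 : X → Y) (f : List (List Int) → X) (g : List (List Int) → Y)
    (hfg : ∀ lv, F2 (f lv) = g lv) :
    ∀ (coord : List (String × List (List Int))) (dA : PySem.Dict String X) (dB : PySem.Dict String Y),
      dB.items = dA.items.map (fun p => (p.1, F2 p.2)) →
      (coord.foldl (fun d p => d.insert p.1 (g p.2)) dB).items =
      (coord.foldl (fun d p => d.insert p.1 (f p.2)) dA).items.map (fun p => (p.1, F2 p.2)) := by
  intro coord
  induction coord with
  | nil => intro dA dB h; simpa using h
  | cons q t ih =>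
    intro dA dB h
    simp only [List.foldl_cons]
    apply ih
    have hkeys : dB.keys = dA.keys := by
      simp only [PySem.Dict.keys, h, List.map_map]
      rfl
    have hcont : dB.contains q.1 = dA.contains q.1 := by
      rw [PySem.Dict.contains_eq_decide_mem_keys, PySem.Dict.contains_eq_decide_mem_keys, hkeys]
    rw [PySem.Dict.items_insert, PySem.Dict.items_insert, hcont]
    by_cases hc : dA.contains q.1 = true
    · rw [if_pos hc, if_pos hc, h, List.map_map, List.map_map]
      apply List.map_congr_left
      intro p hp
      by_cases hpq : p.1 = q.1
      · simp [hpq, hfg]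
      · simp [hpq]
    · rw [if_neg hc, if_neg hc, h, List.map_append]
      simp [hfg]

theorem pvMain (c : List (String × List (List Int))) :
    converte_em_bits c = converte_em_bits_alt c := by
  show ((c.foldl (fun d p => d.insert p.1 (pvF1 p.2)) PySem.Dict.empty).items.foldl
          (fun d p => d.insert p.1 (pvF2 p.2)) PySem.Dict.empty).items
      = (c.foldl (fun d p => d.insert p.1 (pvG p.2)) PySem.Dict.empty).items
  have hA := PySem.Dict.items_foldl_insert_fresh
      (l := (c.foldl (fun d p => d.insert p.1 (pvF1 p.2)) PySem.Dict.empty).items)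
      (k := fun p => p.1) (v := fun p => pvF2 p.2) (d := PySem.Dict.empty)
      (by intro a _; exact PySem.Dict.contains_empty _)
      (by
        have := PySem.Dict.nodup_keys_foldl_insert_key c (fun p => p.1)
          (fun _ p => pvF1 p.2) PySem.Dict.empty (by simp)
        simpa [PySem.Dict.keys] using this)
  beta_reduce at hA
  rw [hA, pvFold_map pvF2 pvF1 pvG pvRow_eq c PySem.Dict.empty PySem.Dict.empty (by rfl)]
  rw [show (PySem.Dict.empty : PySem.Dict String (List String)).items = [] from rfl, List.nil_append]

-- ===== VERDICT (by name: the statement is the Claim_ definition above) =====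
theorem converte_em_bits_spec : Claim_equal_converte_em_bits := by
  intro c _
  unfold Spec_converte_em_bits
  exact pvMain c
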